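-- pv_equiv track=rewrite | github.com/Ollson2921/cperms_ins_enc | cperms_ins_enc/check_regular/check_regular_vert.py | con_dec
-- ===== SOURCE A (Python) =====
-- def con_dec(cperm: list[int]) -> bool:
--     """Returns True if the sequence is constant on bottom
--     and decreasing on top.
--     Looks at vals in reverse order."""
--     initial_val = 0
--     for val in cperm[-1::-1]:
--         if val != 0:
--             if val <= initial_val:
--                 return False
--             initial_val = val
--     return True
-- ===== SOURCE B (Python) =====
-- def con_dec(cperm: list[int]) -> bool:
--     """Returns True if the sequence is constant on bottom
--     and decreasing on top: the nonzero values must all be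
--     positive, pairwise distinct, and already in descending
--     order (i.e. equal to their own reverse-sorted copy)."""
--     nz = [v for v in cperm if v != 0]
--     return all(v > 0 for v in nz) and len(set(nz)) == len(nz) and sorted(nz, reverse=True) == nz
-- ===== Notes on version B (the rewrite author's own statement) =====
-- stated objective: alternative
-- what changed: Replaces A's reverse scan with a running accumulator and early return by a global characterisation checked in independent passes: filter the nonzero values and test that they are all positive, duplicate-free (len(set) comparison) and equal to their own reverse-sorted copy.
import Mathlib
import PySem

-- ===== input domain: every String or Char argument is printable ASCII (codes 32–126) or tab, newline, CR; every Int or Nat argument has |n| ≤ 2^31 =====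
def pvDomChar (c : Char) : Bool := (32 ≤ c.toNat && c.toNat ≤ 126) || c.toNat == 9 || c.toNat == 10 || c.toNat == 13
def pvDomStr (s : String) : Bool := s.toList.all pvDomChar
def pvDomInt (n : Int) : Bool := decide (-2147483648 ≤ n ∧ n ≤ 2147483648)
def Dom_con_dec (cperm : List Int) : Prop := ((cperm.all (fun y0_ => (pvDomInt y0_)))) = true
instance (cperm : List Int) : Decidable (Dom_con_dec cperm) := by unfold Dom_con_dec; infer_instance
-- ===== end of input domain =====

-- B replaces A's reverse-scan accumulator loop by a global characterisation: the nonzero values must be positive, duplicate-free (len(set)) and equal to their own reverse-sorted copy; objective: alternative.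


-- ===== PORT A =====
-- the for-loop over cperm[-1::-1] with early return, threading initial_val
def conDecLoop : List Int → Int → Bool
  | [], _ => true
  | v :: rest, initialVal =>
    if v ≠ 0 then
      if v ≤ initialVal then false
      else conDecLoop rest v
    else conDecLoop rest initialVal

def con_dec (cperm : List Int) : Bool :=
  conDecLoop cperm.reverse 0    -- cperm[-1::-1] is the reversed list

-- ===== PORT B =====
def con_dec_alt (cperm : List Int) : Bool :=
  let nz := cperm.filter (fun v => v ≠ 0)
  nz.all (fun v => 0 < v)                              -- all(v > 0 for v in nz)
    && ((PySem.Set.ofList nz).length == nz.length)     -- len(set(nz)) == len(nz)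
    && (PySem.List.sorted nz (fun x => x) true == nz)  -- sorted(nz, reverse=True) == nz

-- ===== PRECONDITION & SPEC =====
def Spec_con_dec (cperm : List Int) (out : Bool) : Prop := out = con_dec_alt cperm
instance (cperm : List Int) (out : Bool) : Decidable (Spec_con_dec cperm out) := by unfold Spec_con_dec; infer_instance

-- ===== CLAIM (what is proved, stated in full; the proofs are below) =====
def Claim_equal_con_dec : Prop := ∀ (cperm : List Int), Dom_con_dec cperm → Spec_con_dec cperm (con_dec cperm)

-- ===== LEMMAS AND PROOFS =====

-- A's loop accepts iff 0 followed by the nonzero values (in scan order) is strictly increasing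
theorem conDecLoop_iff (l : List Int) : ∀ i : Int,
    (conDecLoop l i = true ↔ List.Pairwise (· < ·) (i :: l.filter (fun v => v ≠ 0))) := by
  induction l with
  | nil => intro i; simp [conDecLoop]
  | cons v rest ih =>
    intro i
    by_cases hv : v = 0
    · subst hv; simpa [conDecLoop] using ih i
    · rw [show (v :: rest).filter (fun v => v ≠ 0) = v :: rest.filter (fun v => v ≠ 0) from by
        simp [hv]]
      by_cases hle : v ≤ i
      · constructor
        · intro h; simp [conDecLoop, hv, hle] at h
        · intro h; exfalso
          have := (List.pairwise_cons.mp h).1 v (by simp); omega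
      · rw [show conDecLoop (v :: rest) i = conDecLoop rest v from by
          simp [conDecLoop, hv, hle], ih v]
        constructor
        · intro h
          refine List.pairwise_cons.mpr ⟨?_, h⟩
          intro b hb
          rcases List.mem_cons.mp hb with rfl | hbf
          · omega
          · have := (List.pairwise_cons.mp h).1 b hbf; omega
        · intro h; exact (List.pairwise_cons.mp h).2

-- set(xs) keeps a subsequence of xs
theorem ofList_sublist (xs : List Int) : (PySem.Set.ofList xs).Sublist xs := by
  have key : ∀ (xs s : List Int), (xs.foldl PySem.Set.add s).Sublist (s ++ xs) := by
    intro xs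
    induction xs with
    | nil => intro s; simp
    | cons x t ih =>
      intro s
      have h1 : (t.foldl PySem.Set.add (PySem.Set.add s x)).Sublist (PySem.Set.add s x ++ t) := ih _
      have h2 : (PySem.Set.add s x).Sublist (s ++ [x]) := by
        by_cases hx : x ∈ s
        · rw [PySem.Set.add_of_mem hx]; exact List.sublist_append_left s [x]
        · rw [PySem.Set.add_of_not_mem hx]
      have h3 := h1.trans (h2.append_right t)
      simpa using h3
  simpa using key xs []

-- duplicate-free ↔ the deduplication keeps everything (len(set(nz)) == len(nz))
theorem setLen_eq_iff_nodup (xs : List Int) :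
    (PySem.Set.ofList xs).length = xs.length ↔ xs.Nodup := by
  constructor
  · intro h
    rw [← (ofList_sublist xs).eq_of_length h]
    exact PySem.Set.nodup_ofList xs
  · intro h
    rw [PySem.Set.ofList_eq_self_of_nodup xs h]

-- strictly-descending ↔ duplicate-free and fixed by reverse-sorting
theorem pairwise_gt_iff (xs : List Int) :
    xs.Pairwise (fun a b => b < a) ↔ (xs.Nodup ∧ PySem.List.sorted xs (fun x => x) true = xs) := by
  constructor
  · intro h
    refine ⟨h.imp (fun hab => by omega), ?_⟩
    exact PySem.List.sorted_rev_eq_of_perm_of_pairwise_gt xs xs (fun x => x) (List.Perm.refl xs) h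
  · rintro ⟨hnd, hs⟩
    have hge : xs.Pairwise (fun a b => (b : Int) ≤ a) := by
      have := PySem.List.sorted_pairwise_rev xs (fun x => x)
      rwa [hs] at this
    exact (hnd.and hge).imp (fun hab => by omega)

-- ===== VERDICT (by name: the statement is the Claim_ definition above) =====
theorem con_dec_spec : Claim_equal_con_dec := by
  intro cperm _
  show con_dec cperm = con_dec_alt cperm
  unfold con_dec con_dec_alt
  rw [Bool.eq_iff_iff, conDecLoop_iff]
  simp only [List.filter_reverse]
  set nz := cperm.filter (fun v => decide ¬v = 0) with hnz
  rw [List.pairwise_cons]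
  simp only [Bool.and_eq_true, List.all_eq_true, beq_iff_eq, decide_eq_true_eq,
    List.mem_reverse, List.pairwise_reverse]
  rw [setLen_eq_iff_nodup]
  have h := pairwise_gt_iff nz
  tauto
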